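-- pv_equiv track=rewrite | github.com/ncreighton/empire-infrastructure | grimoire-intelligence/grimoire/amplify/amplify_pipeline.py | _seasonal_alignment
-- ===== SOURCE A (Python) =====
-- def _seasonal_alignment(intention: str, month: int) -> str:
--     """Describe how the current season helps or hinders the intention."""
--     intention_lower = intention.lower()
--
--     # Spring (growth, attraction)
--     if month in (3, 4, 5):
--         boosted = ["love", "creativity", "prosperity", "healing", "confidence"]
--         if any(k in intention_lower for k in boosted):
--             return "Strongly aligned. Spring's expansive, growth-oriented energy naturally amplifies this intention."
--         if any(k in intention_lower for k in ("banishing", "transformation")):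
--             return "Moderately aligned. Banishing and transformation can work in spring by clearing space for new growth."
--         return "Aligned. Spring supports most workings through its energy of renewal and emergence."
--
--     # Summer (peak power, manifestation)
--     if month in (6, 7, 8):
--         boosted = ["confidence", "creativity", "prosperity", "courage", "communication"]
--         if any(k in intention_lower for k in boosted):
--             return "Powerfully aligned. Summer's peak solar energy supercharges action-oriented intentions."
--         if any(k in intention_lower for k in ("peace", "grounding", "healing")):
--             return "Moderately aligned. Add grounding elements to balance summer's intense outward energy."
--         return "Aligned. Summer's abundant energy supports all workings performed with focus."
--
--     # Autumn (release, reflection, harvest)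
--     if month in (9, 10, 11):
--         boosted = ["banishing", "transformation", "divination", "grounding", "wisdom"]
--         if any(k in intention_lower for k in boosted):
--             return "Deeply aligned. Autumn's reflective, releasing energy powerfully supports this intention."
--         if any(k in intention_lower for k in ("love", "creativity", "prosperity")):
--             return "Moderately aligned. Frame these intentions as harvesting what you have already planted."
--         return "Aligned. The thinning veil and harvest energy support inward-focused workings."
--
--     # Winter (rest, gestation, inner work)
--     if month in (12, 1, 2):
--         boosted = ["protection", "healing", "transformation", "divination", "peace", "grounding"]
--         if any(k in intention_lower for k in boosted):
--             return "Strongly aligned. Winter's introspective stillness amplifies this inner-focused intention."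
--         if any(k in intention_lower for k in ("confidence", "creativity", "prosperity")):
--             return "Moderately aligned. Winter is a time of gestation; plant these seeds now for spring emergence."
--         return "Aligned. Winter's quiet power supports the practitioner who works with patience and depth."
--
--     return "Aligned. The Wheel of the Year supports all sincere practice."
-- ===== SOURCE B (Python) =====
-- # Inverted, rule-driven reformulation: instead of four season branches each scanning
-- # its own keyword lists, B maps the month to a season key, then makes a single pass
-- # over ONE flat keyword->(season, tier) rule list, accumulating the maximum matching
-- # tier (2 = boosted, 1 = moderate), and finally indexes the season's message triple
-- # (default, moderate, boosted) by that tier. Correct because A's ordered checks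
-- # (boosted first, then moderate, then default) are exactly "pick the message of the
-- # highest tier among matching keywords for the current season".
--
-- _FALLBACK = "Aligned. The Wheel of the Year supports all sincere practice."
--
-- _SEASON_BY_MONTH = {3: "spring", 4: "spring", 5: "spring",
--                     6: "summer", 7: "summer", 8: "summer",
--                     9: "autumn", 10: "autumn", 11: "autumn",
--                     12: "winter", 1: "winter", 2: "winter"}
--
-- # season -> (default message, moderate message, boosted message), indexed by tier
-- _MESSAGES = {
--     "spring": ("Aligned. Spring supports most workings through its energy of renewal and emergence.",
--                "Moderately aligned. Banishing and transformation can work in spring by clearing space for new growth.",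
--                "Strongly aligned. Spring's expansive, growth-oriented energy naturally amplifies this intention."),
--     "summer": ("Aligned. Summer's abundant energy supports all workings performed with focus.",
--                "Moderately aligned. Add grounding elements to balance summer's intense outward energy.",
--                "Powerfully aligned. Summer's peak solar energy supercharges action-oriented intentions."),
--     "autumn": ("Aligned. The thinning veil and harvest energy support inward-focused workings.",
--                "Moderately aligned. Frame these intentions as harvesting what you have already planted.",
--                "Deeply aligned. Autumn's reflective, releasing energy powerfully supports this intention."),
--     "winter": ("Aligned. Winter's quiet power supports the practitioner who works with patience and depth.",
--                "Moderately aligned. Winter is a time of gestation; plant these seeds now for spring emergence.",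
--                "Strongly aligned. Winter's introspective stillness amplifies this inner-focused intention."),
-- }
--
-- # one flat rule list: keyword -> the seasons it speaks to and how strongly
-- _RULES = [
--     ("love", (("spring", 2), ("autumn", 1))),
--     ("creativity", (("spring", 2), ("summer", 2), ("autumn", 1), ("winter", 1))),
--     ("prosperity", (("spring", 2), ("summer", 2), ("autumn", 1), ("winter", 1))),
--     ("healing", (("spring", 2), ("summer", 1), ("winter", 2))),
--     ("confidence", (("spring", 2), ("summer", 2), ("winter", 1))),
--     ("banishing", (("spring", 1), ("autumn", 2))),
--     ("transformation", (("spring", 1), ("autumn", 2), ("winter", 2))),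
--     ("courage", (("summer", 2),)),
--     ("communication", (("summer", 2),)),
--     ("peace", (("summer", 1), ("winter", 2))),
--     ("grounding", (("summer", 1), ("autumn", 2), ("winter", 2))),
--     ("divination", (("autumn", 2), ("winter", 2))),
--     ("wisdom", (("autumn", 2),)),
--     ("protection", (("winter", 2),)),
-- ]
--
--
-- def _tier(low: str, season: str) -> int:
--     tier = 0
--     for kw, placements in _RULES:
--         if kw in low:
--             for s, t in placements:
--                 if s == season:
--                     tier = max(tier, t)
--     return tier
--
--
-- def _seasonal_alignment(intention: str, month: int) -> str:
--     season = _SEASON_BY_MONTH.get(month)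
--     if season is None:
--         return _FALLBACK
--     return _MESSAGES[season][_tier(intention.lower(), season)]
-- ===== Notes on version B (the rewrite author's own statement) =====
-- stated objective: alternative
-- what changed: Inverted the control flow: instead of four hand-written season branches each running ordered any()-scans over per-season keyword lists, B maps the month to a season key via a dict, folds ONE flat keyword->(season, tier) rule list to the maximal matching tier, and indexes the season's (default, moderate, boosted) message triple by that tier.
import Mathlib
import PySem

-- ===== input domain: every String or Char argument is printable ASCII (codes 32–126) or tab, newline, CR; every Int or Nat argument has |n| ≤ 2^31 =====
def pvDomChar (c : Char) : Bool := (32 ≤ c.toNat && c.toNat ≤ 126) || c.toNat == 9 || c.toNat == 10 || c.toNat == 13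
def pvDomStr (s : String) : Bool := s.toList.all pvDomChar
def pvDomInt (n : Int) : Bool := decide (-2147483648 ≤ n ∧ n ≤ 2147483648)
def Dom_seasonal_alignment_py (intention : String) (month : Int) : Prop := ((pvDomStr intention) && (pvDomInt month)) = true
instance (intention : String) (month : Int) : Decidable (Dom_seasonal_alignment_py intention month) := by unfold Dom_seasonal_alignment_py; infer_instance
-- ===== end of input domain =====

-- B inverts A's four per-season keyword-list branches into a month->season key, one flat
-- keyword->(season, tier) rule list folded to the maximal matching tier, and a message
-- triple indexed by that tier (objective: alternative).

-- ===== PORT A =====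
-- literal transliteration of A: four season branches in source order
def seasonal_alignment_py (intention : String) (month : Int) : String :=
  let intention_lower := PySem.Str.lower intention
  if [(3 : Int), 4, 5].contains month then
    let boosted := ["love", "creativity", "prosperity", "healing", "confidence"]
    if boosted.any (fun k => PySem.Str.isIn k intention_lower) then
      "Strongly aligned. Spring's expansive, growth-oriented energy naturally amplifies this intention."
    else if ["banishing", "transformation"].any (fun k => PySem.Str.isIn k intention_lower) then
      "Moderately aligned. Banishing and transformation can work in spring by clearing space for new growth."
    else
      "Aligned. Spring supports most workings through its energy of renewal and emergence."
  else if [(6 : Int), 7, 8].contains month then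
    let boosted := ["confidence", "creativity", "prosperity", "courage", "communication"]
    if boosted.any (fun k => PySem.Str.isIn k intention_lower) then
      "Powerfully aligned. Summer's peak solar energy supercharges action-oriented intentions."
    else if ["peace", "grounding", "healing"].any (fun k => PySem.Str.isIn k intention_lower) then
      "Moderately aligned. Add grounding elements to balance summer's intense outward energy."
    else
      "Aligned. Summer's abundant energy supports all workings performed with focus."
  else if [(9 : Int), 10, 11].contains month then
    let boosted := ["banishing", "transformation", "divination", "grounding", "wisdom"]
    if boosted.any (fun k => PySem.Str.isIn k intention_lower) then
      "Deeply aligned. Autumn's reflective, releasing energy powerfully supports this intention."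
    else if ["love", "creativity", "prosperity"].any (fun k => PySem.Str.isIn k intention_lower) then
      "Moderately aligned. Frame these intentions as harvesting what you have already planted."
    else
      "Aligned. The thinning veil and harvest energy support inward-focused workings."
  else if [(12 : Int), 1, 2].contains month then
    let boosted := ["protection", "healing", "transformation", "divination", "peace", "grounding"]
    if boosted.any (fun k => PySem.Str.isIn k intention_lower) then
      "Strongly aligned. Winter's introspective stillness amplifies this inner-focused intention."
    else if ["confidence", "creativity", "prosperity"].any (fun k => PySem.Str.isIn k intention_lower) then
      "Moderately aligned. Winter is a time of gestation; plant these seeds now for spring emergence."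
    else
      "Aligned. Winter's quiet power supports the practitioner who works with patience and depth."
  else
    "Aligned. The Wheel of the Year supports all sincere practice."

-- ===== PORT B =====
def pvFallback : String := "Aligned. The Wheel of the Year supports all sincere practice."

def pvSeasonByMonth : PySem.Dict Int String :=
  PySem.Dict.ofList [(3, "spring"), (4, "spring"), (5, "spring"),
                     (6, "summer"), (7, "summer"), (8, "summer"),
                     (9, "autumn"), (10, "autumn"), (11, "autumn"),
                     (12, "winter"), (1, "winter"), (2, "winter")]

-- season -> (default message, moderate message, boosted message), indexed by tier
def pvMessages : PySem.Dict String (String × String × String) :=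
  PySem.Dict.ofList
    [("spring", ("Aligned. Spring supports most workings through its energy of renewal and emergence.",
                 "Moderately aligned. Banishing and transformation can work in spring by clearing space for new growth.",
                 "Strongly aligned. Spring's expansive, growth-oriented energy naturally amplifies this intention.")),
     ("summer", ("Aligned. Summer's abundant energy supports all workings performed with focus.",
                 "Moderately aligned. Add grounding elements to balance summer's intense outward energy.",
                 "Powerfully aligned. Summer's peak solar energy supercharges action-oriented intentions.")),
     ("autumn", ("Aligned. The thinning veil and harvest energy support inward-focused workings.",
                 "Moderately aligned. Frame these intentions as harvesting what you have already planted.",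
                 "Deeply aligned. Autumn's reflective, releasing energy powerfully supports this intention.")),
     ("winter", ("Aligned. Winter's quiet power supports the practitioner who works with patience and depth.",
                 "Moderately aligned. Winter is a time of gestation; plant these seeds now for spring emergence.",
                 "Strongly aligned. Winter's introspective stillness amplifies this inner-focused intention."))]

-- one flat rule list: keyword -> the seasons it speaks to and how strongly (2 = boosted, 1 = moderate)
def pvRules : List (String × List (String × Int)) :=
  [("love", [("spring", 2), ("autumn", 1)]),
   ("creativity", [("spring", 2), ("summer", 2), ("autumn", 1), ("winter", 1)]),
   ("prosperity", [("spring", 2), ("summer", 2), ("autumn", 1), ("winter", 1)]),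
   ("healing", [("spring", 2), ("summer", 1), ("winter", 2)]),
   ("confidence", [("spring", 2), ("summer", 2), ("winter", 1)]),
   ("banishing", [("spring", 1), ("autumn", 2)]),
   ("transformation", [("spring", 1), ("autumn", 2), ("winter", 2)]),
   ("courage", [("summer", 2)]),
   ("communication", [("summer", 2)]),
   ("peace", [("summer", 1), ("winter", 2)]),
   ("grounding", [("summer", 1), ("autumn", 2), ("winter", 2)]),
   ("divination", [("autumn", 2), ("winter", 2)]),
   ("wisdom", [("autumn", 2)]),
   ("protection", [("winter", 2)])]

-- Python helper _tier(low, season): fold over the flat rule list keeping the max matching tier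
def pvTier (low : String) (season : String) : Int :=
  pvRules.foldl (fun tier r =>
    if PySem.Str.isIn r.1 low then
      r.2.foldl (fun tier st => if st.1 = season then max tier st.2 else tier) tier
    else tier) 0

def seasonal_alignment_py_alt (intention : String) (month : Int) : String :=
  match PySem.Dict.get? pvSeasonByMonth month with
  | none => pvFallback
  | some season =>
    -- _MESSAGES[season] always exists and the tier is always 0, 1 or 2
    let msgs := (PySem.Dict.get? pvMessages season).getD ("", "", "")
    let tier := pvTier (PySem.Str.lower intention) season
    if tier = 0 then msgs.1 else if tier = 1 then msgs.2.1 else msgs.2.2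

-- ===== PRECONDITION & SPEC =====
def Spec_seasonal_alignment_py (intention : String) (month : Int) (out : String) : Prop := out = seasonal_alignment_py_alt intention month
instance (intention : String) (month : Int) (out : String) : Decidable (Spec_seasonal_alignment_py intention month out) := by unfold Spec_seasonal_alignment_py; infer_instance

-- ===== CLAIM (what is proved, stated in full; the proofs are below) =====
def Claim_equal_seasonal_alignment_py : Prop := ∀ (intention : String) (month : Int), Dom_seasonal_alignment_py intention month → Spec_seasonal_alignment_py intention month (seasonal_alignment_py intention month)

-- ===== LEMMAS AND PROOFS =====

theorem pvMonthCases (m : Int) :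
    m = 1 ∨ m = 2 ∨ m = 3 ∨ m = 4 ∨ m = 5 ∨ m = 6 ∨ m = 7 ∨ m = 8 ∨ m = 9 ∨ m = 10 ∨ m = 11 ∨ m = 12 ∨ (m < 1 ∨ 12 < m) := by
  omega

-- pvTier with the fourteen keyword-membership tests abstracted as Bools (proof device)
def pvTierE (b1 b2 b3 b4 b5 b6 b7 b8 b9 b10 b11 b12 b13 b14 : Bool) (season : String) : Int :=
  List.foldl (fun tier (p : Bool × List (String × Int)) =>
      if p.1 then
        p.2.foldl (fun tier st => if st.1 = season then max tier st.2 else tier) tier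
      else tier) 0
    [(b1, [("spring", 2), ("autumn", 1)]),
     (b2, [("spring", 2), ("summer", 2), ("autumn", 1), ("winter", 1)]),
     (b3, [("spring", 2), ("summer", 2), ("autumn", 1), ("winter", 1)]),
     (b4, [("spring", 2), ("summer", 1), ("winter", 2)]),
     (b5, [("spring", 2), ("summer", 2), ("winter", 1)]),
     (b6, [("spring", 1), ("autumn", 2)]),
     (b7, [("spring", 1), ("autumn", 2), ("winter", 2)]),
     (b8, [("summer", 2)]),
     (b9, [("summer", 2)]),
     (b10, [("summer", 1), ("winter", 2)]),
     (b11, [("summer", 1), ("autumn", 2), ("winter", 2)]),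
     (b12, [("autumn", 2), ("winter", 2)]),
     (b13, [("autumn", 2)]),
     (b14, [("winter", 2)])]

theorem pvTier_eq_E (low : String) (season : String) :
    pvTier low season =
      pvTierE (PySem.Str.isIn "love" low) (PySem.Str.isIn "creativity" low)
        (PySem.Str.isIn "prosperity" low) (PySem.Str.isIn "healing" low)
        (PySem.Str.isIn "confidence" low) (PySem.Str.isIn "banishing" low)
        (PySem.Str.isIn "transformation" low) (PySem.Str.isIn "courage" low)
        (PySem.Str.isIn "communication" low) (PySem.Str.isIn "peace" low)
        (PySem.Str.isIn "grounding" low) (PySem.Str.isIn "divination" low)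
        (PySem.Str.isIn "wisdom" low) (PySem.Str.isIn "protection" low) season := rfl

theorem pvE_spring : ∀ (b1 b2 b3 b4 b5 b6 b7 b8 b9 b10 b11 b12 b13 b14 : Bool),
    pvTierE b1 b2 b3 b4 b5 b6 b7 b8 b9 b10 b11 b12 b13 b14 "spring" =
      (if ((b1 || (b2 || (b3 || (b4 || (b5 || false)))))) = true then 2
       else if ((b6 || (b7 || false))) = true then 1 else 0) := by decide

theorem pvE_summer : ∀ (b1 b2 b3 b4 b5 b6 b7 b8 b9 b10 b11 b12 b13 b14 : Bool),
    pvTierE b1 b2 b3 b4 b5 b6 b7 b8 b9 b10 b11 b12 b13 b14 "summer" =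
      (if ((b5 || (b2 || (b3 || (b8 || (b9 || false)))))) = true then 2
       else if ((b10 || (b11 || (b4 || false)))) = true then 1 else 0) := by decide

theorem pvE_autumn : ∀ (b1 b2 b3 b4 b5 b6 b7 b8 b9 b10 b11 b12 b13 b14 : Bool),
    pvTierE b1 b2 b3 b4 b5 b6 b7 b8 b9 b10 b11 b12 b13 b14 "autumn" =
      (if ((b6 || (b7 || (b12 || (b11 || (b13 || false)))))) = true then 2
       else if ((b1 || (b2 || (b3 || false)))) = true then 1 else 0) := by decide

theorem pvE_winter : ∀ (b1 b2 b3 b4 b5 b6 b7 b8 b9 b10 b11 b12 b13 b14 : Bool),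
    pvTierE b1 b2 b3 b4 b5 b6 b7 b8 b9 b10 b11 b12 b13 b14 "winter" =
      (if ((b14 || (b4 || (b7 || (b12 || (b10 || (b11 || false))))))) = true then 2
       else if ((b5 || (b2 || (b3 || false)))) = true then 1 else 0) := by decide

-- ===== VERDICT (by name: the statement is the Claim_ definition above) =====
theorem seasonal_alignment_py_spec : Claim_equal_seasonal_alignment_py := by
  intro intention month _
  unfold Spec_seasonal_alignment_py
  rcases pvMonthCases month with rfl|rfl|rfl|rfl|rfl|rfl|rfl|rfl|rfl|rfl|rfl|rfl|h
  · -- month = 1 (winter)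
    simp only [seasonal_alignment_py, seasonal_alignment_py_alt,
      show PySem.Dict.get? pvSeasonByMonth 1 = some "winter" from rfl,
      show ([(3 : Int), 4, 5].contains 1) = false from rfl,
      show ([(6 : Int), 7, 8].contains 1) = false from rfl,
      show ([(9 : Int), 10, 11].contains 1) = false from rfl,
      show ([(12 : Int), 1, 2].contains 1) = true from rfl, if_true, if_false, Bool.false_eq_true,
      List.any_cons, List.any_nil, pvTier_eq_E, pvE_winter]
    split_ifs <;> first | rfl | omega
  · -- month = 2 (winter)
    simp only [seasonal_alignment_py, seasonal_alignment_py_alt,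
      show PySem.Dict.get? pvSeasonByMonth 2 = some "winter" from rfl,
      show ([(3 : Int), 4, 5].contains 2) = false from rfl,
      show ([(6 : Int), 7, 8].contains 2) = false from rfl,
      show ([(9 : Int), 10, 11].contains 2) = false from rfl,
      show ([(12 : Int), 1, 2].contains 2) = true from rfl, if_true, if_false, Bool.false_eq_true,
      List.any_cons, List.any_nil, pvTier_eq_E, pvE_winter]
    split_ifs <;> first | rfl | omega
  · -- month = 3 (spring)
    simp only [seasonal_alignment_py, seasonal_alignment_py_alt,
      show PySem.Dict.get? pvSeasonByMonth 3 = some "spring" from rfl,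
      show ([(3 : Int), 4, 5].contains 3) = true from rfl, if_true,
      List.any_cons, List.any_nil, pvTier_eq_E, pvE_spring]
    split_ifs <;> first | rfl | omega
  · -- month = 4 (spring)
    simp only [seasonal_alignment_py, seasonal_alignment_py_alt,
      show PySem.Dict.get? pvSeasonByMonth 4 = some "spring" from rfl,
      show ([(3 : Int), 4, 5].contains 4) = true from rfl, if_true,
      List.any_cons, List.any_nil, pvTier_eq_E, pvE_spring]
    split_ifs <;> first | rfl | omega
  · -- month = 5 (spring)
    simp only [seasonal_alignment_py, seasonal_alignment_py_alt,
      show PySem.Dict.get? pvSeasonByMonth 5 = some "spring" from rfl,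
      show ([(3 : Int), 4, 5].contains 5) = true from rfl, if_true,
      List.any_cons, List.any_nil, pvTier_eq_E, pvE_spring]
    split_ifs <;> first | rfl | omega
  · -- month = 6 (summer)
    simp only [seasonal_alignment_py, seasonal_alignment_py_alt,
      show PySem.Dict.get? pvSeasonByMonth 6 = some "summer" from rfl,
      show ([(3 : Int), 4, 5].contains 6) = false from rfl,
      show ([(6 : Int), 7, 8].contains 6) = true from rfl, if_true, if_false, Bool.false_eq_true,
      List.any_cons, List.any_nil, pvTier_eq_E, pvE_summer]
    split_ifs <;> first | rfl | omega
  · -- month = 7 (summer)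
    simp only [seasonal_alignment_py, seasonal_alignment_py_alt,
      show PySem.Dict.get? pvSeasonByMonth 7 = some "summer" from rfl,
      show ([(3 : Int), 4, 5].contains 7) = false from rfl,
      show ([(6 : Int), 7, 8].contains 7) = true from rfl, if_true, if_false, Bool.false_eq_true,
      List.any_cons, List.any_nil, pvTier_eq_E, pvE_summer]
    split_ifs <;> first | rfl | omega
  · -- month = 8 (summer)
    simp only [seasonal_alignment_py, seasonal_alignment_py_alt,
      show PySem.Dict.get? pvSeasonByMonth 8 = some "summer" from rfl,
      show ([(3 : Int), 4, 5].contains 8) = false from rfl,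
      show ([(6 : Int), 7, 8].contains 8) = true from rfl, if_true, if_false, Bool.false_eq_true,
      List.any_cons, List.any_nil, pvTier_eq_E, pvE_summer]
    split_ifs <;> first | rfl | omega
  · -- month = 9 (autumn)
    simp only [seasonal_alignment_py, seasonal_alignment_py_alt,
      show PySem.Dict.get? pvSeasonByMonth 9 = some "autumn" from rfl,
      show ([(3 : Int), 4, 5].contains 9) = false from rfl,
      show ([(6 : Int), 7, 8].contains 9) = false from rfl,
      show ([(9 : Int), 10, 11].contains 9) = true from rfl, if_true, if_false, Bool.false_eq_true,
      List.any_cons, List.any_nil, pvTier_eq_E, pvE_autumn]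
    split_ifs <;> first | rfl | omega
  · -- month = 10 (autumn)
    simp only [seasonal_alignment_py, seasonal_alignment_py_alt,
      show PySem.Dict.get? pvSeasonByMonth 10 = some "autumn" from rfl,
      show ([(3 : Int), 4, 5].contains 10) = false from rfl,
      show ([(6 : Int), 7, 8].contains 10) = false from rfl,
      show ([(9 : Int), 10, 11].contains 10) = true from rfl, if_true, if_false, Bool.false_eq_true,
      List.any_cons, List.any_nil, pvTier_eq_E, pvE_autumn]
    split_ifs <;> first | rfl | omega
  · -- month = 11 (autumn)
    simp only [seasonal_alignment_py, seasonal_alignment_py_alt,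
      show PySem.Dict.get? pvSeasonByMonth 11 = some "autumn" from rfl,
      show ([(3 : Int), 4, 5].contains 11) = false from rfl,
      show ([(6 : Int), 7, 8].contains 11) = false from rfl,
      show ([(9 : Int), 10, 11].contains 11) = true from rfl, if_true, if_false, Bool.false_eq_true,
      List.any_cons, List.any_nil, pvTier_eq_E, pvE_autumn]
    split_ifs <;> first | rfl | omega
  · -- month = 12 (winter)
    simp only [seasonal_alignment_py, seasonal_alignment_py_alt,
      show PySem.Dict.get? pvSeasonByMonth 12 = some "winter" from rfl,
      show ([(3 : Int), 4, 5].contains 12) = false from rfl,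
      show ([(6 : Int), 7, 8].contains 12) = false from rfl,
      show ([(9 : Int), 10, 11].contains 12) = false from rfl,
      show ([(12 : Int), 1, 2].contains 12) = true from rfl, if_true, if_false, Bool.false_eq_true,
      List.any_cons, List.any_nil, pvTier_eq_E, pvE_winter]
    split_ifs <;> first | rfl | omega
  · -- month outside 1..12: both sides return the Wheel-of-the-Year fallback
    have c1 : ([(3 : Int), 4, 5].contains month) = false := by simp; omega
    have c2 : ([(6 : Int), 7, 8].contains month) = false := by simp; omega
    have c3 : ([(9 : Int), 10, 11].contains month) = false := by simp; omega
    have c4 : ([(12 : Int), 1, 2].contains month) = false := by simp; omega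
    have cg : PySem.Dict.get? pvSeasonByMonth month = none := by
      rw [PySem.Dict.get?_eq_none_iff_not_mem_keys]
      rw [show pvSeasonByMonth.keys = [3, 4, 5, 6, 7, 8, 9, 10, 11, 12, 1, 2] from rfl]
      simp
      omega
    simp only [seasonal_alignment_py, seasonal_alignment_py_alt, c1, c2, c3, c4, cg,
      if_false, Bool.false_eq_true, pvFallback]
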